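-- pv_equiv track=rewrite | github.com/ozil111/NovaFEA | python_jax/code_gen/hex8r_eas/f90_to_for_converter.py | find_split_pos
-- ===== SOURCE A (Python) =====
-- def find_split_pos(content, max_len):
--     """在 content 的前 max_len 个字符中找到一个合适的拆分位置。
--
--     优先在逗号之后拆分，其次在空格处拆分。
--     返回拆分位置（content[:pos] 保留在当前行，content[pos:] 移到下一行）。
--     """
--     # 优先：在最后一个逗号后拆分（保留逗号在当前行）
--     last_comma = -1
--     for i in range(min(max_len, len(content)) - 1, -1, -1):
--         if content[i] == ',':
--             last_comma = i
--             break
--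
--     if last_comma > 10:
--         return last_comma + 1
--
--     # 其次：在空格处拆分（避免在标识符中间断开）
--     last_space = -1
--     for i in range(min(max_len, len(content)) - 1, -1, -1):
--         if content[i] == ' ':
--             last_space = i
--             break
--
--     if last_space > 10:
--         return last_space + 1
--
--     # 最后：强制在 max_len 处拆分
--     return max_len
-- ===== SOURCE B (Python) =====
-- def find_split_pos(content, max_len):
--     """Single forward pass recording the last comma and last space in the window."""
--     last_comma = -1
--     last_space = -1
--     for i in range(min(max_len, len(content))):
--         c = content[i]
--         if c == ',':
--             last_comma = i
--         if c == ' ':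
--             last_space = i
--     if last_comma > 10:
--         return last_comma + 1
--     if last_space > 10:
--         return last_space + 1
--     return max_len
-- ===== Notes on version B (the rewrite author's own statement) =====
-- stated objective: simpler
-- what changed: Replaces A's two separate backward scans with break by one forward pass that records the last comma and last space positions simultaneously.
import Mathlib
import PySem

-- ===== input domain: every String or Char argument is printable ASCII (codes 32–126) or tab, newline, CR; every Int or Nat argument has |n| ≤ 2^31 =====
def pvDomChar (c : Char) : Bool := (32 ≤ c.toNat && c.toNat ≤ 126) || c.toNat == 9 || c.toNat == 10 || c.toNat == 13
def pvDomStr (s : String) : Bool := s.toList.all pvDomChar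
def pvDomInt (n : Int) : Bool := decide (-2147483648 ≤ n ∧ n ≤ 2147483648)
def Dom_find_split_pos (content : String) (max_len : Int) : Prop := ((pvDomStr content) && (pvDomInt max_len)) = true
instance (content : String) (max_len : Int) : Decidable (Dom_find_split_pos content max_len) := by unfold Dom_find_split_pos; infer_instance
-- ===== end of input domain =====

-- B replaces A's two backward scans (each with a break) by one forward pass recording
-- the last comma and last space simultaneously; objective: simpler.

-- ===== PORT A =====
-- backward scan with break: first index i in the given list with content[i] == c, else -1
def pvScanBreak (cs : List Char) (c : Char) : List Int → Int
  | [] => -1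
  | i :: rest => if PySem.List.pyGet? cs i = some c then i else pvScanBreak cs c rest

def find_split_pos (content : String) (max_len : Int) : Int :=
  let cs := content.toList
  let n : Int := min max_len (cs.length : Int)
  let last_comma := pvScanBreak cs ',' (PySem.List.pyRange (n - 1) (-1) (-1))
  if last_comma > 10 then last_comma + 1
  else
    let last_space := pvScanBreak cs ' ' (PySem.List.pyRange (n - 1) (-1) (-1))
    if last_space > 10 then last_space + 1
    else max_len

-- ===== PORT B =====
def find_split_pos_alt (content : String) (max_len : Int) : Int :=
  let cs := content.toList
  let n : Int := min max_len (cs.length : Int)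
  let p := (PySem.List.pyRange 0 n 1).foldl
    (fun (acc : Int × Int) i =>
      let acc := if PySem.List.pyGet? cs i = some ',' then (i, acc.2) else acc
      if PySem.List.pyGet? cs i = some ' ' then (acc.1, i) else acc)
    (-1, -1)
  if p.1 > 10 then p.1 + 1
  else if p.2 > 10 then p.2 + 1
  else max_len

-- ===== PRECONDITION & SPEC =====
def Spec_find_split_pos (content : String) (max_len : Int) (out : Int) : Prop := out = find_split_pos_alt content max_len
instance (content : String) (max_len : Int) (out : Int) : Decidable (Spec_find_split_pos content max_len out) := by unfold Spec_find_split_pos; infer_instance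

-- ===== CLAIM (what is proved, stated in full; the proofs are below) =====
def Claim_equal_find_split_pos : Prop := ∀ (content : String) (max_len : Int), Dom_find_split_pos content max_len → Spec_find_split_pos content max_len (find_split_pos content max_len)

-- ===== LEMMAS AND PROOFS =====

-- the backward scan with break over l.reverse equals the forward "record last match" fold over l
theorem pvScanBreak_reverse (cs : List Char) (c : Char) (l : List Int) :
    pvScanBreak cs c l.reverse
      = l.foldl (fun a i => if PySem.List.pyGet? cs i = some c then i else a) (-1) := by
  induction l using List.reverseRecOn with
  | nil => rfl
  | append_singleton xs i ih =>
    simp only [List.reverse_append, List.reverse_cons, List.reverse_nil, List.nil_append,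
      List.singleton_append, pvScanBreak, List.foldl_append, List.foldl_cons, List.foldl_nil]
    split_ifs with h
    · rfl
    · exact ih

-- the paired fold computes the two single folds componentwise
theorem pvPairFold (cs : List Char) (l : List Int) (a b : Int) :
    l.foldl
      (fun (acc : Int × Int) i =>
        let acc := if PySem.List.pyGet? cs i = some ',' then (i, acc.2) else acc
        if PySem.List.pyGet? cs i = some ' ' then (acc.1, i) else acc)
      (a, b)
      = (l.foldl (fun a i => if PySem.List.pyGet? cs i = some ',' then i else a) a,
         l.foldl (fun a i => if PySem.List.pyGet? cs i = some ' ' then i else a) b) := by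
  induction l generalizing a b with
  | nil => rfl
  | cons i rest ih =>
    simp only [List.foldl_cons]
    rw [← ih]
    congr 1
    by_cases h1 : PySem.List.pyGet? cs i = some ','
    · simp [h1]
    · by_cases h2 : PySem.List.pyGet? cs i = some ' ' <;> simp [h1, h2]

-- the countdown range A scans is the reverse of the forward range B scans
theorem pvRange_rev (n : Int) :
    PySem.List.pyRange (n - 1) (-1) (-1) = (PySem.List.pyRange 0 n 1).reverse := by
  rw [PySem.List.pyRange_neg_one_eq_reverse]
  norm_num

-- ===== VERDICT (by name: the statement is the Claim_ definition above) =====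
theorem find_split_pos_spec : Claim_equal_find_split_pos := by
  intro content max_len _
  unfold Spec_find_split_pos find_split_pos find_split_pos_alt
  simp only [pvRange_rev, pvScanBreak_reverse, pvPairFold]
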